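-- pv_equiv track=rewrite | github.com/jcolinpatrick/kryptos | scripts/e_chart_11_rotation.py | read_grid
-- ===== SOURCE A (Python) =====
-- def read_grid(grid, direction='row_lr'):
--     """Read text from a 2D grid using specified direction.
--
--     Same direction options as make_grid.
--     """
--     result = []
--     nrows = len(grid)
--     ncols = max(len(r) for r in grid) if grid else 0
--
--     if direction == 'row_lr':
--         for r in range(nrows):
--             for c in range(len(grid[r])):
--                 if grid[r][c]:
--                     result.append(grid[r][c])
--
--     elif direction == 'row_rl':
--         for r in range(nrows):
--             for c in range(len(grid[r]) - 1, -1, -1):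
--                 if grid[r][c]:
--                     result.append(grid[r][c])
--
--     elif direction == 'col_tb':
--         for c in range(ncols):
--             for r in range(nrows):
--                 if c < len(grid[r]) and grid[r][c]:
--                     result.append(grid[r][c])
--
--     elif direction == 'col_bt':
--         for c in range(ncols):
--             for r in range(nrows - 1, -1, -1):
--                 if c < len(grid[r]) and grid[r][c]:
--                     result.append(grid[r][c])
--
--     return ''.join(result)
-- ===== SOURCE B (Python) =====
-- def read_grid(grid, direction='row_lr'):
--     """Read text from a 2D grid using specified direction.
--
--     Same direction options as make_grid.
--     """
--     if direction == 'row_lr':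
--         return ''.join(ch for row in grid for ch in row if ch)
--     if direction == 'row_rl':
--         return ''.join(ch for row in grid for ch in row[::-1] if ch)
--     if direction in ('col_tb', 'col_bt'):
--         rows = grid if direction == 'col_tb' else grid[::-1]
--         # walk all rows in lockstep: one cell per surviving row per round
--         live = [(len(row), iter(row)) for row in rows if row]
--         out = []
--         while live:
--             nxt = []
--             for n, it in live:
--                 ch = next(it)
--                 if ch:
--                     out.append(ch)
--                 if n > 1:
--                     nxt.append((n - 1, it))
--             live = nxt
--         return ''.join(out)
--     return ''
-- ===== Notes on version B (the rewrite author's own statement) =====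
-- stated objective: alternative
-- what changed: B drops A's four index-loop nests (ncols = max row length, per-cell bounds tests): row directions become flat comprehensions over the rows themselves, and column directions are read by a lockstep peel that keeps one iterator per surviving row and emits one cell per row per round, so no column index or ncols is ever computed.
import Mathlib
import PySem

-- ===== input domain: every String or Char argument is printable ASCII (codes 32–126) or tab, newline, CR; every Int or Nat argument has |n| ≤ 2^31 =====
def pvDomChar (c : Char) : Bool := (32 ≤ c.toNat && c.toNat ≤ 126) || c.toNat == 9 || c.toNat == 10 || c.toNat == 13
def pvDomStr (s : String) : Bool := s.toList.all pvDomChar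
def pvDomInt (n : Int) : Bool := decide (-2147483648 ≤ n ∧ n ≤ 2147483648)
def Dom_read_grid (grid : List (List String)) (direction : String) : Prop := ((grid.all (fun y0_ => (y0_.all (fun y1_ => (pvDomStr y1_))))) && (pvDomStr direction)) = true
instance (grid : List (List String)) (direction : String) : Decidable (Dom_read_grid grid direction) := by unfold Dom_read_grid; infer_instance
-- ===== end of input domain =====

-- B replaces A's four index-loop nests (with ncols = max row length and bounds tests) by flat
-- comprehensions for the row directions and, for the column directions, a lockstep walk of
-- per-row iterators that peels one cell per surviving row per round: alternative decomposition.

-- ===== PORT A =====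
def read_grid (grid : List (List String)) (direction : String) : String :=
  let nrows : Int := PySem.List.len grid
  let ncols : Int := if grid ≠ [] then
      PySem.List.maxD (grid.map (fun r => PySem.List.len r)) (fun x => x) 0
    else 0
  let result : List String :=
    if direction = "row_lr" then
      (PySem.List.pyRange 0 nrows 1).foldl (fun acc r =>
        (PySem.List.pyRange 0 (PySem.List.len (PySem.List.pyGetD grid r [])) 1).foldl (fun acc c =>
          if PySem.List.pyGetD (PySem.List.pyGetD grid r []) c "" ≠ "" then
            acc ++ [PySem.List.pyGetD (PySem.List.pyGetD grid r []) c ""]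
          else acc) acc) []
    else if direction = "row_rl" then
      (PySem.List.pyRange 0 nrows 1).foldl (fun acc r =>
        (PySem.List.pyRange (PySem.List.len (PySem.List.pyGetD grid r []) - 1) (-1) (-1)).foldl (fun acc c =>
          if PySem.List.pyGetD (PySem.List.pyGetD grid r []) c "" ≠ "" then
            acc ++ [PySem.List.pyGetD (PySem.List.pyGetD grid r []) c ""]
          else acc) acc) []
    else if direction = "col_tb" then
      (PySem.List.pyRange 0 ncols 1).foldl (fun acc c =>
        (PySem.List.pyRange 0 nrows 1).foldl (fun acc r =>
          if c < PySem.List.len (PySem.List.pyGetD grid r []) ∧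
             PySem.List.pyGetD (PySem.List.pyGetD grid r []) c "" ≠ "" then
            acc ++ [PySem.List.pyGetD (PySem.List.pyGetD grid r []) c ""]
          else acc) acc) []
    else if direction = "col_bt" then
      (PySem.List.pyRange 0 ncols 1).foldl (fun acc c =>
        (PySem.List.pyRange (nrows - 1) (-1) (-1)).foldl (fun acc r =>
          if c < PySem.List.len (PySem.List.pyGetD grid r []) ∧
             PySem.List.pyGetD (PySem.List.pyGetD grid r []) c "" ≠ "" then
            acc ++ [PySem.List.pyGetD (PySem.List.pyGetD grid r []) c ""]
          else acc) acc) []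
    else []
  PySem.Str.join "" result

-- ===== PORT B =====
-- Source B's truthiness filter 'if ch'
def pvK (ch : String) : Option String := if ch ≠ "" then some ch else none

-- one round of Source B's while-loop: the 'for n, it in live' body run over the whole live list;
-- a Python iterator is modelled exactly by its remaining suffix list: next(it) is the head
-- (always present: a live row still has n ≥ 1 cells), advancing it is tail
def pvRound (live : List (Int × List String)) : List String × List (Int × List String) :=
  live.foldl (fun (acc : List String × List (Int × List String)) p =>
      (if p.2.headD "" ≠ "" then acc.1 ++ [p.2.headD ""] else acc.1,
       if 1 < p.1 then acc.2 ++ [(p.1 - 1, p.2.tail)] else acc.2)) ([], [])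

-- Source B's 'while live:' loop, as structural recursion on a fuel that bounds the number of
-- rounds (the loop's own termination measure); pvPeel always supplies enough fuel, so the
-- guard is never reached and the loop is exactly Python's
def pvPeelGo : Nat → List (Int × List String) → List String
  | _, [] => []
  | 0, _ :: _ => []
  | fuel + 1, live@(_ :: _) => (pvRound live).1 ++ pvPeelGo fuel (pvRound live).2

def pvFuel (live : List (Int × List String)) : Nat :=
  (live.map (fun p => p.1.toNat)).sum + live.length

def pvPeel (live : List (Int × List String)) : List String :=
  pvPeelGo (pvFuel live) live

def read_grid_alt (grid : List (List String)) (direction : String) : String :=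
  if direction = "row_lr" then
    PySem.Str.join "" (grid.flatMap (fun row => row.filterMap pvK))
  else if direction = "row_rl" then
    PySem.Str.join "" (grid.flatMap (fun row =>
      ((PySem.List.slice? row none none (-1)).getD []).filterMap pvK))
  else if direction = "col_tb" ∨ direction = "col_bt" then
    let rows := if direction = "col_tb" then grid
                else (PySem.List.slice? grid none none (-1)).getD []
    PySem.Str.join "" (pvPeel ((rows.filter (fun row => decide (row ≠ []))).map
      (fun row => (PySem.List.len row, row))))
  else ""

-- ===== PRECONDITION & SPEC =====
def Spec_read_grid (grid : List (List String)) (direction : String) (out : String) : Prop := out = read_grid_alt grid direction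
instance (grid : List (List String)) (direction : String) (out : String) : Decidable (Spec_read_grid grid direction out) := by unfold Spec_read_grid; infer_instance

-- ===== CLAIM (what is proved, stated in full; the proofs are below) =====
def Claim_equal_read_grid : Prop := ∀ (grid : List (List String)) (direction : String), Dom_read_grid grid direction → Spec_read_grid grid direction (read_grid grid direction)

-- ===== LEMMAS AND PROOFS =====

-- shape of a round's second component
lemma pvRound_snd_aux (live : List (Int × List String)) (a1 : List String)
    (a2 : List (Int × List String)) :
    (live.foldl (fun (acc : List String × List (Int × List String)) p =>
      (if p.2.headD "" ≠ "" then acc.1 ++ [p.2.headD ""] else acc.1,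
       if 1 < p.1 then acc.2 ++ [(p.1 - 1, p.2.tail)] else acc.2)) (a1, a2)).2
    = a2 ++ (live.filter (fun p => decide (1 < p.1))).map (fun p => (p.1 - 1, p.2.tail)) := by
  induction live generalizing a1 a2 with
  | nil => simp
  | cons p ps ih =>
    simp only [List.foldl_cons, ih, List.filter_cons]
    by_cases h : 1 < p.1 <;> simp [h]

lemma pvRound_snd (live : List (Int × List String)) :
    (pvRound live).2
    = (live.filter (fun p => decide (1 < p.1))).map (fun p => (p.1 - 1, p.2.tail)) := by
  unfold pvRound
  simpa using pvRound_snd_aux live [] []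

lemma pvMeas_le (live : List (Int × List String)) :
    ((((live.filter (fun p => decide (1 < p.1))).map (fun p => (p.1 - 1, p.2.tail))).map
        (fun p => p.1.toNat)).sum
      + ((live.filter (fun p => decide (1 < p.1))).map (fun p => (p.1 - 1, p.2.tail))).length)
    ≤ (live.map (fun p => p.1.toNat)).sum := by
  induction live with
  | nil => simp
  | cons p ps ih =>
    by_cases h : 1 < p.1
    · simp only [List.filter_cons, List.map_cons, List.sum_cons, List.length_cons,
        decide_eq_true_eq, if_pos h]
      have : (p.1 - 1).toNat + 1 = p.1.toNat := by omega
      omega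
    · simp only [List.filter_cons, List.map_cons, List.sum_cons,
        decide_eq_true_eq, if_neg h]
      omega

lemma pvMeas_lt (live : List (Int × List String)) (h : ¬ live = []) :
    ((((live.filter (fun p => decide (1 < p.1))).map (fun p => (p.1 - 1, p.2.tail))).map
        (fun p => p.1.toNat)).sum
      + ((live.filter (fun p => decide (1 < p.1))).map (fun p => (p.1 - 1, p.2.tail))).length)
    < (live.map (fun p => p.1.toNat)).sum + live.length := by
  have h1 := pvMeas_le live
  have h2 : 0 < live.length := List.length_pos_iff.mpr h
  omega


lemma pvPeel_nil : pvPeel [] = [] := rfl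

-- any two sufficient fuels run the loop identically
lemma pvPeelGo_congr : ∀ (f1 f2 : Nat) (live : List (Int × List String)),
    pvFuel live ≤ f1 → pvFuel live ≤ f2 → pvPeelGo f1 live = pvPeelGo f2 live := by
  intro f1
  induction f1 with
  | zero =>
    intro f2 live h1 _
    have : live = [] := by
      cases live with
      | nil => rfl
      | cons p ps => simp [pvFuel] at h1
    subst this
    cases f2 <;> rfl
  | succ f1 ih =>
    intro f2 live h1 h2
    cases live with
    | nil => cases f2 <;> rfl
    | cons p ps =>
      cases f2 with
      | zero => simp [pvFuel] at h2
      | succ g =>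
        simp only [pvPeelGo]
        congr 1
        have hlt : pvFuel (pvRound (p :: ps)).2 < pvFuel (p :: ps) := by
          rw [pvRound_snd]
          exact pvMeas_lt (p :: ps) (by simp)
        exact ih g (pvRound (p :: ps)).2 (by omega) (by omega)

-- unfolding pvPeel one round on a nonempty live list
lemma pvPeel_step (live : List (Int × List String)) (h : live ≠ []) :
    pvPeel live = (pvRound live).1 ++ pvPeel (pvRound live).2 := by
  cases live with
  | nil => exact absurd rfl h
  | cons p ps =>
    have hfuel : pvFuel (p :: ps) = ((p :: ps).map (fun p => p.1.toNat)).sum + ps.length + 1 := by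
      simp [pvFuel]
      omega
    rw [pvPeel, hfuel]
    simp only [pvPeelGo]
    congr 1
    have hlt : pvFuel (pvRound (p :: ps)).2 < pvFuel (p :: ps) := by
      rw [pvRound_snd]
      exact pvMeas_lt (p :: ps) (by simp)
    rw [pvPeel]
    exact pvPeelGo_congr _ _ _ (by omega) (le_refl _)

-- first component of one round: the cells kept this round
lemma pvRound_fst_aux (live : List (Int × List String)) (a1 : List String)
    (a2 : List (Int × List String)) :
    (live.foldl (fun (acc : List String × List (Int × List String)) p =>
      (if p.2.headD "" ≠ "" then acc.1 ++ [p.2.headD ""] else acc.1,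
       if 1 < p.1 then acc.2 ++ [(p.1 - 1, p.2.tail)] else acc.2)) (a1, a2)).1
    = a1 ++ live.filterMap (fun p => pvK (p.2.headD "")) := by
  induction live generalizing a1 a2 with
  | nil => simp
  | cons p ps ih =>
    simp only [List.foldl_cons, ih, List.filterMap_cons]
    by_cases h : p.2.head?.getD "" = ""
    · simp [pvK, h]
    · simp [pvK, h]

lemma pvRound_fst (live : List (Int × List String)) :
    (pvRound live).1 = live.filterMap (fun p => pvK (p.2.headD "")) := by
  unfold pvRound
  simpa using pvRound_fst_aux live [] []

-- the optional cell A reads at column c of a row, and its truthiness filter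
def pvEnt (c : Int) (row : List String) : Option String :=
  if c < PySem.List.len row then some (PySem.List.pyGetD row c "") else none

def pvKeep (o : Option String) : Option String :=
  o.bind (fun ch => if ch ≠ "" then some ch else none)

-- A's innermost append loop over a row = append of the filtered row
lemma foldl_row (row : List String) (acc : List String) :
    row.foldl (fun a c => if c ≠ "" then a ++ [c] else a) acc = acc ++ row.filterMap pvK := by
  induction row generalizing acc with
  | nil => simp
  | cons x xs ih =>
    by_cases hx : x = ""
    · rw [List.foldl_cons, if_neg (by simp [hx]), ih]; simp [pvK, hx]
    · rw [List.foldl_cons, if_pos hx, ih]; simp [pvK, hx]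

-- A's guarded column loop over the rows = append of the filtered column
lemma foldl_col (grid : List (List String)) (c : Int) (acc : List String) :
    grid.foldl (fun a row =>
        if c < PySem.List.len row ∧ PySem.List.pyGetD row c "" ≠ "" then
          a ++ [PySem.List.pyGetD row c ""] else a) acc
      = acc ++ (grid.map (pvEnt c)).filterMap pvKeep := by
  induction grid generalizing acc with
  | nil => simp
  | cons row rows ih =>
    by_cases h1 : c < PySem.List.len row
    · by_cases h2 : PySem.List.pyGetD row c "" = ""
      · rw [List.foldl_cons, if_neg (fun hc => hc.2 h2), ih, List.map_cons, List.filterMap_cons,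
          show pvKeep (pvEnt c row) = none by
            simp only [pvEnt, pvKeep]; rw [if_pos h1]; simp [h2]]
      · rw [List.foldl_cons, if_pos ⟨h1, h2⟩, ih, List.map_cons, List.filterMap_cons,
          show pvKeep (pvEnt c row) = some (PySem.List.pyGetD row c "") by
            simp only [pvEnt, pvKeep]; rw [if_pos h1]; simp [h2]]
        simp
    · rw [List.foldl_cons, if_neg (fun hc => h1 hc.1), ih, List.map_cons, List.filterMap_cons,
        show pvKeep (pvEnt c row) = none by
          simp only [pvEnt, pvKeep]; rw [if_neg h1]; rfl]

-- a foldl over range(len(xs)-1, -1, -1) reading xs[j] is a foldl over xs reversed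
lemma foldl_pyRange_rev {A B : Type} (xs : List A) (d : A) (f : B → A → B) (init : B) :
    (PySem.List.pyRange (PySem.List.len xs - 1) (-1) (-1)).foldl
        (fun a j => f a (PySem.List.pyGetD xs j d)) init
      = xs.reverse.foldl f init := by
  rw [PySem.List.pyRange_neg_one_eq_reverse,
      show (-1 : Int) + 1 = 0 from by norm_num,
      show PySem.List.len xs - 1 + 1 = PySem.List.len xs from by ring,
      ← List.foldl_map (f := fun j => PySem.List.pyGetD xs j d) (g := f)
          (l := (PySem.List.pyRange 0 (PySem.List.len xs)).reverse) (init := init),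
      List.map_reverse, PySem.List.map_pyGetD_pyRange_zero]

-- A's row_lr nest over a list of rows
lemma lrA (grid : List (List String)) (acc : List String) :
    grid.foldl (fun acc row =>
      (PySem.List.pyRange 0 (PySem.List.len row) 1).foldl (fun a c =>
        if PySem.List.pyGetD row c "" ≠ "" then a ++ [PySem.List.pyGetD row c ""] else a) acc) acc
    = acc ++ grid.flatMap (fun row => row.filterMap pvK) := by
  induction grid generalizing acc with
  | nil => simp
  | cons row rows ih =>
    rw [List.foldl_cons,
        PySem.List.foldl_pyRange_zero_pyGetD row ""
          (fun a c => if c ≠ "" then a ++ [c] else a) acc,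
        foldl_row, ih]
    simp

-- A's row_rl nest over a list of rows
lemma rlA (grid : List (List String)) (acc : List String) :
    grid.foldl (fun acc row =>
      (PySem.List.pyRange (PySem.List.len row - 1) (-1) (-1)).foldl (fun a c =>
        if PySem.List.pyGetD row c "" ≠ "" then a ++ [PySem.List.pyGetD row c ""] else a) acc) acc
    = acc ++ grid.flatMap (fun row => row.reverse.filterMap pvK) := by
  induction grid generalizing acc with
  | nil => simp
  | cons row rows ih =>
    rw [List.foldl_cons,
        foldl_pyRange_rev row "" (fun a c => if c ≠ "" then a ++ [c] else a) acc,
        foldl_row, ih]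
    simp

-- A's col_tb nest over a list of column indices
lemma tbA (l : List Int) (grid : List (List String)) (acc : List String) :
    l.foldl (fun acc c =>
      (PySem.List.pyRange 0 (PySem.List.len grid) 1).foldl (fun a r =>
        if c < PySem.List.len (PySem.List.pyGetD grid r []) ∧
           PySem.List.pyGetD (PySem.List.pyGetD grid r []) c "" ≠ "" then
          a ++ [PySem.List.pyGetD (PySem.List.pyGetD grid r []) c ""] else a) acc) acc
    = acc ++ l.flatMap (fun c => (grid.map (pvEnt c)).filterMap pvKeep) := by
  induction l generalizing acc with
  | nil => simp
  | cons c cs ih =>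
    rw [List.foldl_cons,
        PySem.List.foldl_pyRange_zero_pyGetD grid []
          (fun a row => if c < PySem.List.len row ∧ PySem.List.pyGetD row c "" ≠ "" then
            a ++ [PySem.List.pyGetD row c ""] else a) acc,
        foldl_col, ih]
    simp

-- A's col_bt nest over a list of column indices
lemma btA (l : List Int) (grid : List (List String)) (acc : List String) :
    l.foldl (fun acc c =>
      (PySem.List.pyRange (PySem.List.len grid - 1) (-1) (-1)).foldl (fun a r =>
        if c < PySem.List.len (PySem.List.pyGetD grid r []) ∧
           PySem.List.pyGetD (PySem.List.pyGetD grid r []) c "" ≠ "" then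
          a ++ [PySem.List.pyGetD (PySem.List.pyGetD grid r []) c ""] else a) acc) acc
    = acc ++ l.flatMap (fun c => (grid.reverse.map (pvEnt c)).filterMap pvKeep) := by
  induction l generalizing acc with
  | nil => simp
  | cons c cs ih =>
    rw [List.foldl_cons,
        foldl_pyRange_rev grid []
          (fun a row => if c < PySem.List.len row ∧ PySem.List.pyGetD row c "" ≠ "" then
            a ++ [PySem.List.pyGetD row c ""] else a) acc,
        foldl_col, ih]
    simp

-- ===== the peel = column-flatMap correspondence =====

def pvNmax (g : List (List String)) : Nat := (g.map List.length).foldr max 0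

lemma pvNmax_zero (g : List (List String)) (h : pvNmax g = 0) : ∀ r ∈ g, r = [] := by
  induction g with
  | nil => simp
  | cons r rs ih =>
    simp only [pvNmax, List.map_cons, List.foldr_cons, Nat.max_eq_zero_iff] at h
    intro x hx
    rcases List.mem_cons.mp hx with hx | hx
    · subst hx; exact List.eq_nil_of_length_eq_zero h.1
    · exact ih h.2 x hx

lemma pvNmax_all_nil (g : List (List String)) (h : ∀ r ∈ g, r = []) : pvNmax g = 0 := by
  induction g with
  | nil => rfl
  | cons a as ih =>
    have h1 : pvNmax as = 0 := ih (fun r hr => h r (List.mem_cons_of_mem a hr))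
    simp only [pvNmax, List.map_cons, List.foldr_cons]
    rw [h a List.mem_cons_self]
    simpa [pvNmax] using h1

lemma pvNmax_le (g : List (List String)) (r : List String) (h : r ∈ g) :
    r.length ≤ pvNmax g := by
  induction g with
  | nil => simp at h
  | cons a as ih =>
    simp only [pvNmax, List.map_cons, List.foldr_cons] at *
    rcases List.mem_cons.mp h with h | h
    · subst h; omega
    · have := ih h; omega

lemma pvNmax_cast_le (g : List (List String)) (M : Int) (h0 : 0 ≤ M)
    (h : ∀ r ∈ g, (r.length : Int) ≤ M) : ((pvNmax g : Nat) : Int) ≤ M := by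
  induction g with
  | nil => simpa [pvNmax] using h0
  | cons a as ih =>
    have h1 := ih (fun r hr => h r (List.mem_cons_of_mem a hr))
    have h2 := h a List.mem_cons_self
    simp only [pvNmax, List.map_cons, List.foldr_cons] at *
    push_cast
    omega

def pvTails (g : List (List String)) : List (List String) :=
  (g.filter (fun row => decide (1 < row.length))).map List.tail

lemma pvNmax_tails (g : List (List String)) : pvNmax (pvTails g) = pvNmax g - 1 := by
  induction g with
  | nil => simp [pvTails, pvNmax]
  | cons r rs ih =>
    by_cases h : 1 < r.length
    · simp only [pvTails, List.filter_cons, decide_eq_true_eq, if_pos h, List.map_cons] at *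
      simp only [pvNmax, List.map_cons, List.foldr_cons] at *
      rw [List.length_tail]
      omega
    · simp only [pvTails, List.filter_cons, decide_eq_true_eq, if_neg h] at *
      simp only [pvNmax, List.map_cons, List.foldr_cons] at *
      omega

-- column 0 of g is the heads of its nonempty rows
lemma pvCol0 (g : List (List String)) :
    (g.filter (fun row => decide (row ≠ []))).filterMap (fun row => pvK (row.headD ""))
      = (g.map (pvEnt 0)).filterMap pvKeep := by
  induction g with
  | nil => simp
  | cons row rows ih =>
    cases row with
    | nil =>
      rw [List.filter_cons_of_neg (by simp), List.map_cons, List.filterMap_cons,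
        show pvKeep (pvEnt 0 ([] : List String)) = none from rfl]
      exact ih
    | cons x xs =>
      have h0 : pvEnt 0 (x :: xs) = some x := by
        simp [pvEnt, PySem.List.pyGetD]
      rw [List.filter_cons_of_pos (by simp), List.filterMap_cons, List.map_cons,
        List.filterMap_cons, h0, ih]
      by_cases hx : x = "" <;> simp [pvK, pvKeep, hx]

-- column 1+k of g is column k of the tails of its long rows
lemma pvColShift (g : List (List String)) (k : Nat) :
    (g.map (pvEnt (1 + (k : Int)))).filterMap pvKeep
      = ((pvTails g).map (pvEnt (k : Int))).filterMap pvKeep := by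
  induction g with
  | nil => simp [pvTails]
  | cons row rows ih =>
    by_cases h : 1 < row.length
    · have hrow : pvEnt (1 + (k : Int)) row = pvEnt (k : Int) row.tail := by
        simp only [pvEnt, PySem.List.len_eq, List.length_tail]
        by_cases hc : 1 + (k : Int) < (row.length : Int)
        · rw [if_pos hc, if_pos (by omega)]
          congr 1
          rw [show (1 + (k : Int)) = ((k + 1 : Nat) : Int) from by push_cast; ring,
            PySem.List.pyGetD_natCast, PySem.List.pyGetD_natCast]
          cases row with
          | nil => simp at h
          | cons x xs => simp
        · rw [if_neg hc, if_neg (by omega)]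
      have ht : pvTails (row :: rows) = row.tail :: pvTails rows := by
        simp [pvTails, h]
      rw [ht, List.map_cons, List.map_cons, List.filterMap_cons, List.filterMap_cons, hrow, ih]
    · have hrow : pvEnt (1 + (k : Int)) row = none := by
        simp only [pvEnt, PySem.List.len_eq]
        rw [if_neg (by omega)]
      have ht : pvTails (row :: rows) = pvTails rows := by
        simp [pvTails, h]
      rw [ht, List.map_cons, List.filterMap_cons, hrow]
      simpa [pvKeep] using ih

-- columns at or beyond every row length are empty
lemma pvColEmpty (g : List (List String)) (c : Int) (hc : ∀ r ∈ g, (r.length : Int) ≤ c) :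
    (g.map (pvEnt c)).filterMap pvKeep = [] := by
  induction g with
  | nil => simp
  | cons row rows ih =>
    have h1 : pvEnt c row = none := by
      simp only [pvEnt, PySem.List.len_eq]
      rw [if_neg (by have := hc row List.mem_cons_self; omega)]
    simp only [List.map_cons, List.filterMap_cons, h1]
    exact ih (fun r hr => hc r (List.mem_cons_of_mem row hr))

-- Source B's peel over the live rows of g = A's column-major flatMap over range(pvNmax g)
lemma pvPeel_eq (n : Nat) : ∀ (g : List (List String)), pvNmax g = n →
    pvPeel ((g.filter (fun row => decide (row ≠ []))).map (fun row => (PySem.List.len row, row)))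
      = (PySem.List.pyRange 0 (n : Int) 1).flatMap
          (fun c => (g.map (pvEnt c)).filterMap pvKeep) := by
  induction n with
  | zero =>
    intro g hg
    have hfil : g.filter (fun row => decide (row ≠ [])) = [] := by
      rw [List.filter_eq_nil_iff]
      intro r hr
      simp [pvNmax_zero g hg r hr]
    rw [hfil]
    simp [pvPeel_nil]
  | succ n ih =>
    intro g hg
    have hfil : g.filter (fun row => decide (row ≠ [])) ≠ [] := by
      intro hcon
      rw [List.filter_eq_nil_iff] at hcon
      have hall : ∀ r ∈ g, r = [] := fun r hr => by simpa using hcon r hr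
      have := pvNmax_all_nil g hall
      omega
    have hlive : (g.filter (fun row => decide (row ≠ []))).map
        (fun row => (PySem.List.len row, row)) ≠ [] := by
      simpa using hfil
    rw [pvPeel_step _ hlive, pvRound_fst, pvRound_snd]
    -- the kept cells of this round are column 0
    have hfst : ((g.filter (fun row => decide (row ≠ []))).map
        (fun row => (PySem.List.len row, row))).filterMap (fun p => pvK (p.2.headD ""))
        = (g.map (pvEnt 0)).filterMap pvKeep := by
      rw [List.filterMap_map]
      exact pvCol0 g
    -- the surviving iterators are exactly the tails of the long rows
    have hsnd : (((g.filter (fun row => decide (row ≠ []))).map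
          (fun row => (PySem.List.len row, row))).filter (fun p => decide (1 < p.1))).map
            (fun p => (p.1 - 1, p.2.tail))
        = (pvTails g).map (fun row => (PySem.List.len row, row)) := by
      rw [List.filter_map, List.map_map, List.filter_filter]
      have hpred : ∀ row : List String, ∀ _ : row ∈ g,
          (((fun p : Int × List String => decide (1 < p.1)) ∘
            (fun row => (PySem.List.len row, row))) row && decide (row ≠ []))
          = decide (1 < row.length) := by
        intro row _
        simp only [Function.comp, PySem.List.len_eq]
        by_cases h : 1 < row.length
        · have hne : row ≠ [] := by intro hc; subst hc; simp at h
          have hlt : 1 < (row.length : Int) := by omega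
          simp [h, hne, hlt]
        · have hlt : ¬ (1 < (row.length : Int)) := by omega
          simp [h, hlt]
      rw [List.filter_congr hpred, pvTails, List.map_map]
      apply List.map_congr_left
      intro row hrow
      have h1 : 1 < row.length := by simpa using (List.mem_filter.mp hrow).2
      simp only [Function.comp, PySem.List.len_eq, List.length_tail, Prod.mk.injEq]
      exact ⟨by omega, trivial⟩
    rw [hfst, hsnd]
    -- recurse on the tails
    have htails : (pvTails g).filter (fun row => decide (row ≠ [])) = pvTails g := by
      rw [List.filter_eq_self]
      intro row hrow
      rcases List.mem_map.mp hrow with ⟨r, hr, hEq⟩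
      have h1 : 1 < r.length := by simpa using (List.mem_filter.mp hr).2
      subst hEq
      simp only [decide_eq_true_eq]
      intro hc
      have := congrArg List.length hc
      simp only [List.length_tail, List.length_nil] at this
      omega
    have hrec := ih (pvTails g) (by rw [pvNmax_tails, hg]; omega)
    rw [htails] at hrec
    rw [hrec]
    -- split range(n+1) as 0 followed by the shifted range(n) of the tails
    rw [PySem.List.pyRange_one_cons (by push_cast; omega : (0 : Int) < ((n + 1 : Nat) : Int)),
      List.flatMap_cons]
    congr 1
    rw [show ((0 : Int) + 1) = 1 from by ring,
      PySem.List.pyRange_one (1 : Int) ((n + 1 : Nat) : Int),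
      PySem.List.pyRange_one (0 : Int) ((n : Nat) : Int),
      show (((n + 1 : Nat) : Int) - 1).toNat = n from by omega,
      show (((n : Nat) : Int) - 0).toNat = n from by omega,
      List.flatMap_map, List.flatMap_map]
    have hfun : ∀ k : Nat, (g.map (pvEnt (1 + (k : Int)))).filterMap pvKeep
        = ((pvTails g).map (pvEnt (0 + (k : Int)))).filterMap pvKeep := by
      intro k
      rw [show ((0 : Int) + (k : Int)) = (k : Int) from by ring]
      exact pvColShift g k
    simp only [hfun]

-- ===== the four direction cases =====

lemma case_lr (grid : List (List String)) :
    read_grid grid "row_lr" = read_grid_alt grid "row_lr" := by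
  simp only [read_grid, read_grid_alt, String.reduceEq, ite_true, ite_false]
  rw [PySem.List.foldl_pyRange_zero_pyGetD grid ([] : List String)
        (fun acc row => (PySem.List.pyRange 0 (PySem.List.len row)).foldl
          (fun a c => if PySem.List.pyGetD row c "" ≠ "" then
            a ++ [PySem.List.pyGetD row c ""] else a) acc) [],
      lrA]
  simp

lemma case_rl (grid : List (List String)) :
    read_grid grid "row_rl" = read_grid_alt grid "row_rl" := by
  simp only [read_grid, read_grid_alt, String.reduceEq, ite_true, ite_false]
  rw [PySem.List.foldl_pyRange_zero_pyGetD grid ([] : List String)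
        (fun acc row => (PySem.List.pyRange (PySem.List.len row - 1) (-1) (-1)).foldl
          (fun a c => if PySem.List.pyGetD row c "" ≠ "" then
            a ++ [PySem.List.pyGetD row c ""] else a) acc) [],
      rlA]
  simp [PySem.List.slice?_none_none_neg_one]

-- max? over a nonempty list returns an element that bounds the list
lemma pvFoldlMax_some {α κ : Type} [LT κ] [DecidableLT κ] (key : α → κ) (l : List α) (a : α) :
    ∃ m, (l.foldl (fun acc x =>
      match acc with
      | none => some x
      | some m => if key m < key x then some x else some m) (some a)) = some m
      ∧ (m ∈ l ∨ m = a) := by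
  induction l generalizing a with
  | nil => exact ⟨a, rfl, Or.inr rfl⟩
  | cons b bs ih =>
    simp only [List.foldl_cons]
    by_cases h : key a < key b
    · rw [if_pos h]
      rcases ih b with ⟨m, hm, hmem⟩
      exact ⟨m, hm, by rcases hmem with hm2 | hm2 <;> simp [hm2]⟩
    · rw [if_neg h]
      rcases ih a with ⟨m, hm, hmem⟩
      exact ⟨m, hm, by rcases hmem with hm2 | hm2 <;> simp [hm2]⟩

lemma pvMax?_some {α κ : Type} [LT κ] [DecidableLT κ] (key : α → κ) (xs : List α)
    (h : xs ≠ []) : ∃ m, PySem.List.max? xs key = some m ∧ m ∈ xs := by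
  cases xs with
  | nil => exact absurd rfl h
  | cons x l =>
    rcases pvFoldlMax_some key l x with ⟨m, hm, hmem⟩
    refine ⟨m, ?_, ?_⟩
    · simpa [PySem.List.max?] using hm
    · rcases hmem with h2 | h2 <;> simp [h2]

-- shared tail of the two column cases: A's flatMap over range(ncols) = B's peel
lemma col_common (g : List (List String)) (M : Int) (h0 : 0 ≤ M)
    (hub : ∀ r ∈ g, (r.length : Int) ≤ M) :
    (PySem.List.pyRange 0 M 1).flatMap (fun c => (g.map (pvEnt c)).filterMap pvKeep)
      = pvPeel ((g.filter (fun row => decide (row ≠ []))).map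
          (fun row => (PySem.List.len row, row))) := by
  have hN : ((pvNmax g : Nat) : Int) ≤ M := pvNmax_cast_le g M h0 hub
  rw [PySem.List.pyRange_one_append 0 ((pvNmax g : Nat) : Int) M (by positivity) hN,
    List.flatMap_append]
  have hnil : (PySem.List.pyRange ((pvNmax g : Nat) : Int) M 1).flatMap
      (fun c => (g.map (pvEnt c)).filterMap pvKeep) = [] := by
    rw [List.flatMap_eq_nil_iff]
    intro c hc
    have hc1 := (PySem.List.mem_pyRange_one.mp hc).1
    exact pvColEmpty g c (fun r hr => by
      have h1 : (r.length : Int) ≤ ((pvNmax g : Nat) : Int) := by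
        exact_mod_cast pvNmax_le g r hr
      omega)
  rw [hnil, List.append_nil, pvPeel_eq (pvNmax g) g rfl]

lemma case_tb (grid : List (List String)) :
    read_grid grid "col_tb" = read_grid_alt grid "col_tb" := by
  by_cases hg : grid = []
  · subst hg
    simp only [read_grid, read_grid_alt, String.reduceEq, ite_true, ite_false]
    simp [pvPeel_nil]
  · simp only [read_grid, read_grid_alt, String.reduceEq, ite_true, ite_false]
    rw [if_pos hg, tbA, List.nil_append]
    rcases pvMax?_some (fun x : Int => x) (grid.map (fun r => PySem.List.len r))
      (by simpa using hg) with ⟨m, hm, hmem⟩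
    have hmaxD : PySem.List.maxD (grid.map (fun r => PySem.List.len r)) (fun x => x) 0 = m := by
      unfold PySem.List.maxD
      rw [hm]
      rfl
    have hub : ∀ r ∈ grid, (r.length : Int) ≤ m := by
      intro r hr
      have := PySem.List.max?_isMax hm (PySem.List.len r) (List.mem_map_of_mem hr)
      simpa using this
    have h0 : 0 ≤ m := by
      rcases List.mem_map.mp hmem with ⟨r, _, hEq⟩
      subst hEq
      simp
    rw [hmaxD]
    exact congrArg (PySem.Str.join "") (col_common grid m h0 hub)

lemma case_bt (grid : List (List String)) :
    read_grid grid "col_bt" = read_grid_alt grid "col_bt" := by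
  by_cases hg : grid = []
  · subst hg
    simp only [read_grid, read_grid_alt, String.reduceEq, ite_true, ite_false]
    simp [pvPeel_nil, PySem.List.slice?_none_none_neg_one]
  · simp only [read_grid, read_grid_alt, String.reduceEq, ite_true, ite_false]
    rw [if_pos hg, btA, List.nil_append]
    rcases pvMax?_some (fun x : Int => x) (grid.map (fun r => PySem.List.len r))
      (by simpa using hg) with ⟨m, hm, hmem⟩
    have hmaxD : PySem.List.maxD (grid.map (fun r => PySem.List.len r)) (fun x => x) 0 = m := by
      unfold PySem.List.maxD
      rw [hm]
      rfl
    have hub : ∀ r ∈ grid.reverse, (r.length : Int) ≤ m := by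
      intro r hr
      have hr2 : r ∈ grid := List.mem_reverse.mp hr
      have := PySem.List.max?_isMax hm (PySem.List.len r) (List.mem_map_of_mem hr2)
      simpa using this
    have h0 : 0 ≤ m := by
      rcases List.mem_map.mp hmem with ⟨r, _, hEq⟩
      subst hEq
      simp
    rw [hmaxD, PySem.List.slice?_none_none_neg_one, Option.getD_some]
    exact congrArg (PySem.Str.join "") (col_common grid.reverse m h0 hub)

-- ===== VERDICT (by name: the statement is the Claim_ definition above) =====
theorem read_grid_spec : Claim_equal_read_grid := by
  intro grid direction _
  unfold Spec_read_grid
  by_cases h1 : direction = "row_lr"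
  · subst h1; exact case_lr grid
  by_cases h2 : direction = "row_rl"
  · subst h2; exact case_rl grid
  by_cases h3 : direction = "col_tb"
  · subst h3; exact case_tb grid
  by_cases h4 : direction = "col_bt"
  · subst h4; exact case_bt grid
  simp [read_grid, read_grid_alt, h1, h2, h3, h4, PySem.Str.join]
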